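-- pv_equiv track=rewrite | github.com/qiskit-community/prototype-zne | zne/zne_strategy.py | _build_noisy_stages
-- ===== SOURCE A (Python) =====
-- from collections.abc import Iterable, Iterator, Sequence
--
-- NOISE_AMPLIFICATION_STAGE: str = "noise_amplification"
--
-- def _build_noisy_stages(original_stages: Sequence[str]) -> tuple[str, ...]:
--     """Build noisy stages tuple from original stages."""
--
--     def generate_noisy_stages(original_stages: Sequence[str]) -> Iterator[str]:
--         noise_amplification_stages: Iterator[str] = iter([NOISE_AMPLIFICATION_STAGE])
--         for stage in original_stages:
--             if stage == "scheduling":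
--                 yield from noise_amplification_stages
--             yield stage
--         yield from noise_amplification_stages
--
--     return tuple(generate_noisy_stages(original_stages))
-- ===== SOURCE B (Python) =====
-- NOISE_AMPLIFICATION_STAGE: str = "noise_amplification"
--
-- def _build_noisy_stages(original_stages):
--     """Build noisy stages tuple from original stages."""
--     stages = list(original_stages)
--     if "scheduling" in stages:
--         i = stages.index("scheduling")
--         return tuple(stages[:i] + [NOISE_AMPLIFICATION_STAGE] + stages[i:])
--     return tuple(stages + [NOISE_AMPLIFICATION_STAGE])
-- ===== Notes on version B (the rewrite author's own statement) =====
-- stated objective: simpler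
-- what changed: Replaces the nested generator with a stateful one-shot iterator by a plain membership test, index lookup and slice-based splice before the first 'scheduling' stage (or append at the end).
import Mathlib
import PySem

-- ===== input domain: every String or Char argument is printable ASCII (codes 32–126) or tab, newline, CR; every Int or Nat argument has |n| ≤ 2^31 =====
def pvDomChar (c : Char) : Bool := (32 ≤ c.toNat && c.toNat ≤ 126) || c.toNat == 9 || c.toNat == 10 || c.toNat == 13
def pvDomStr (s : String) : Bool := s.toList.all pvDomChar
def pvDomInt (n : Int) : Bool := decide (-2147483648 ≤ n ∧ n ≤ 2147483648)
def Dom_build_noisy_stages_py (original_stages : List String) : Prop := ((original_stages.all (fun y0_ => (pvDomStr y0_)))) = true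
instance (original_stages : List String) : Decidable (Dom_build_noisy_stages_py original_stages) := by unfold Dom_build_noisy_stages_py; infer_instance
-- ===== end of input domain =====

-- B replaces A's nested generator (with a one-shot consumed iterator) by a membership test,
-- first-index lookup and slice splice: simpler, same linear cost.


-- ===== PORT A =====
-- the generator: 'used' records whether the one-element noise_amplification iterator has been consumed
def pvGenNoisy : List String → Bool → List String
  | [], used => if used then [] else ["noise_amplification"]
  | s :: rest, used =>
      if s = "scheduling" ∧ used = false then
        "noise_amplification" :: s :: pvGenNoisy rest true
      else s :: pvGenNoisy rest used

def build_noisy_stages_py (original_stages : List String) : List String :=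
  pvGenNoisy original_stages false

-- ===== PORT B =====
def build_noisy_stages_py_alt (original_stages : List String) : List String :=
  if "scheduling" ∈ original_stages then
    match PySem.List.index? original_stages "scheduling" with
    | some i => original_stages.take i ++ ["noise_amplification"] ++ original_stages.drop i
    | none => original_stages ++ ["noise_amplification"]  -- unreachable: membership guarantees an index
  else original_stages ++ ["noise_amplification"]

-- ===== PRECONDITION & SPEC =====
def Spec_build_noisy_stages_py (original_stages : List String) (out : List String) : Prop := out = build_noisy_stages_py_alt original_stages
instance (original_stages : List String) (out : List String) : Decidable (Spec_build_noisy_stages_py original_stages out) := by unfold Spec_build_noisy_stages_py; infer_instance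

-- ===== CLAIM (what is proved, stated in full; the proofs are below) =====
def Claim_equal_build_noisy_stages_py : Prop := ∀ (original_stages : List String), Dom_build_noisy_stages_py original_stages → Spec_build_noisy_stages_py original_stages (build_noisy_stages_py original_stages)

-- ===== LEMMAS AND PROOFS =====
-- once the iterator is consumed, the generator just echoes the remaining stages
lemma pvGenNoisy_true (l : List String) : pvGenNoisy l true = l := by
  induction l with
  | nil => simp [pvGenNoisy]
  | cons s rest ih => simp [pvGenNoisy, ih]

lemma pvGenNoisy_false_eq_alt (l : List String) :
    pvGenNoisy l false = build_noisy_stages_py_alt l := by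
  induction l with
  | nil => simp [pvGenNoisy, build_noisy_stages_py_alt]
  | cons s rest ih =>
    by_cases hs : s = "scheduling"
    · subst hs
      have h1 : pvGenNoisy ("scheduling" :: rest) false
          = "noise_amplification" :: "scheduling" :: pvGenNoisy rest true := by
        simp [pvGenNoisy]
      rw [h1, pvGenNoisy_true]
      simp only [build_noisy_stages_py_alt, PySem.List.index?_cons_self, List.mem_cons]
      simp
    · have hstep : pvGenNoisy (s :: rest) false = s :: pvGenNoisy rest false := by
        simp [pvGenNoisy, hs]
      rw [hstep, ih]
      by_cases hm : "scheduling" ∈ rest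
      · obtain ⟨i, hi⟩ : ∃ i, PySem.List.index? rest "scheduling" = some i :=
          Option.isSome_iff_exists.mp ((PySem.List.index?_isSome_iff rest "scheduling").mpr hm)
        have hcons : PySem.List.index? (s :: rest) "scheduling" = some (i + 1) := by
          rw [PySem.List.index?_cons_of_ne rest hs, hi, Option.map_some]
        simp only [build_noisy_stages_py_alt, hi, hcons, List.mem_cons, hm, or_true, if_pos]
        simp
      · have hnone : PySem.List.index? (s :: rest) "scheduling" = none := by
          rw [PySem.List.index?_eq_none_iff]
          simp [hm]
          exact fun h => hs h.symm
        simp only [build_noisy_stages_py_alt, hnone, List.mem_cons, hm, or_false]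
        have hne : "scheduling" ≠ s := fun h => hs h.symm
        simp [hne]

-- ===== VERDICT (by name: the statement is the Claim_ definition above) =====
theorem build_noisy_stages_py_spec : Claim_equal_build_noisy_stages_py := by
  intro l _
  exact pvGenNoisy_false_eq_alt l
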